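-- pv_equiv track=rewrite | github.com/sco1/adventofcode | 2018/Solutions/Python/aoc_2018_day2.py | part1
-- ===== SOURCE A (Python) =====
-- from collections import Counter
--
-- def part1(puzzle_input: list) -> int:
--     counted_input = [Counter(container) for container in puzzle_input]
--
--     n_doubles = 0
--     n_triples = 0
--     for container in counted_input:
--         if 2 in container.values():
--             n_doubles += 1
--
--         if 3 in container.values():
--             n_triples += 1
--
--     return n_doubles * n_triples
-- ===== SOURCE B (Python) =====
-- def _run_lengths(chars):
--     out = []
--     i = 0
--     n = len(chars)
--     while i < n:
--         j = i
--         while j < n and chars[j] == chars[i]: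
--             j += 1
--         out.append(j - i)
--         i = j
--     return out
--
--
-- def part1(puzzle_input: list) -> int:
--     n_doubles = 0
--     n_triples = 0
--     for container in puzzle_input:
--         runs = _run_lengths(sorted(container))
--         if 2 in runs:
--             n_doubles += 1
--         if 3 in runs:
--             n_triples += 1
--     return n_doubles * n_triples
-- ===== Notes on version B (the rewrite author's own statement) =====
-- stated objective: faster
-- what changed: Replaces per-string Counter hash-map frequency counting with sorting the string and scanning consecutive run lengths, checking the run-length list for 2 and 3.
import Mathlib
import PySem

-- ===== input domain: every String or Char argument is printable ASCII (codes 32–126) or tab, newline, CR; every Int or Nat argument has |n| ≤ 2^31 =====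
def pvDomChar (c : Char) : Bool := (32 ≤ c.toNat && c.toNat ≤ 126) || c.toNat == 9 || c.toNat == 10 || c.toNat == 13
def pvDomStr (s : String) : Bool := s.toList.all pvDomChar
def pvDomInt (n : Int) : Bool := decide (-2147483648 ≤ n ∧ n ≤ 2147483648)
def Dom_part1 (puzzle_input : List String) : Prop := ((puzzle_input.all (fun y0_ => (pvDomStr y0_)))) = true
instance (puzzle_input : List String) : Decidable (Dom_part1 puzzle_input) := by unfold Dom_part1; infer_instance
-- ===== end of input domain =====

-- B replaces per-string Counter frequency counting with sorting each string and scanning its consecutive run lengths (alternative algorithm, same result).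


-- ===== PORT A =====
-- counted_input = [Counter(container) for container in puzzle_input]; then one loop over it keeping n_doubles, n_triples
def part1 (puzzle_input : List String) : Int :=
  let counted_input := puzzle_input.map (fun container => PySem.Dict.counter container.toList)
  let p := counted_input.foldl (fun (acc : Int × Int) container =>
      let nd := if (2 : Int) ∈ container.values then acc.1 + 1 else acc.1
      let nt := if (3 : Int) ∈ container.values then acc.2 + 1 else acc.2
      (nd, nt)) (0, 0)
  p.1 * p.2

-- ===== PORT B =====
-- _run_lengths: the outer while loop is this recursion; the inner while loop scanning the current run is takeWhile/dropWhile
def runLengths : List Char → List Nat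
  | [] => []
  | c :: rest =>
      ((rest.takeWhile (fun x => x == c)).length + 1) :: runLengths (rest.dropWhile (fun x => x == c))
  termination_by l => l.length
  decreasing_by
    simp only [List.length_cons]
    exact Nat.lt_succ_of_le (List.length_dropWhile_le _ _)

def part1_alt (puzzle_input : List String) : Int :=
  let p := puzzle_input.foldl (fun (acc : Int × Int) container =>
      let runs := runLengths (PySem.List.sorted container.toList (fun x => x) false)
      let nd := if 2 ∈ runs then acc.1 + 1 else acc.1
      let nt := if 3 ∈ runs then acc.2 + 1 else acc.2
      (nd, nt)) (0, 0)
  p.1 * p.2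

-- ===== PRECONDITION & SPEC =====
def Spec_part1 (puzzle_input : List String) (out : Int) : Prop := out = part1_alt puzzle_input
instance (puzzle_input : List String) (out : Int) : Decidable (Spec_part1 puzzle_input out) := by unfold Spec_part1; infer_instance

-- ===== CLAIM (what is proved, stated in full; the proofs are below) =====
def Claim_equal_part1 : Prop := ∀ (puzzle_input : List String), Dom_part1 puzzle_input → Spec_part1 puzzle_input (part1 puzzle_input)

-- ===== LEMMAS AND PROOFS =====

-- B-side helper fact: dropping the leading run of c from a ≤-sorted list leaves no further c
theorem not_mem_dropWhile {c : Char} {rest : List Char}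
    (hp : rest.Pairwise (· ≤ ·)) (hle : ∀ x ∈ rest, c ≤ x) :
    c ∉ rest.dropWhile (fun x => x == c) := by
  intro hc
  have hsub : (rest.dropWhile (fun x => x == c)).Sublist rest := List.dropWhile_sublist _
  cases hd : rest.dropWhile (fun x => x == c) with
  | nil => simp [hd] at hc
  | cons h t =>
    have hhne : ¬ (h == c) = true := by
      have := List.head?_dropWhile_not (fun x => x == c) rest
      rw [hd] at this; simpa using this
    have hhmem : h ∈ rest := hsub.mem (by simp [hd])
    have hne : h ≠ c := by simpa using hhne
    have hch : c < h := lt_of_le_of_ne (hle h hhmem) (Ne.symm hne)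
    rw [hd] at hc
    rcases List.mem_cons.mp hc with hc | hc
    · exact hne hc.symm
    · have hpd : (h :: t).Pairwise (· ≤ ·) := by
        rw [← hd]; exact hp.sublist hsub
      have : h ≤ c := (List.pairwise_cons.mp hpd).1 c hc
      exact absurd this (not_le.mpr hch)

-- B-side: on a ≤-sorted list the run lengths are exactly the element counts
theorem mem_runLengths : ∀ {l : List Char}, l.Pairwise (· ≤ ·) → ∀ {n : Nat},
    (n ∈ runLengths l ↔ ∃ c ∈ l, l.count c = n) := by
  intro l
  induction l using runLengths.induct with
  | case1 => simp [runLengths]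
  | case2 c rest ih =>
    intro hp n
    set t := rest.takeWhile (fun x => x == c) with ht
    set d := rest.dropWhile (fun x => x == c) with hdd
    have hrest : rest = t ++ d := (List.takeWhile_append_dropWhile ..).symm
    have hpr : rest.Pairwise (· ≤ ·) := (List.pairwise_cons.mp hp).2
    have hle : ∀ x ∈ rest, c ≤ x := (List.pairwise_cons.mp hp).1
    have hpd : d.Pairwise (· ≤ ·) := hpr.sublist (List.dropWhile_sublist _)
    have hcd : c ∉ d := not_mem_dropWhile hpr hle
    have htc : ∀ x ∈ t, x = c := by
      intro x hx
      have := List.mem_takeWhile_imp hx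
      simpa using this
    have h1 : t.count c = t.length := by
      rw [List.count_eq_length]
      intro b hb
      exact (htc b hb).symm
    have hcount_c : (c :: rest).count c = t.length + 1 := by
      rw [hrest]
      simp [List.count_append, List.count_eq_zero.mpr hcd, h1]
    have hcount_ne : ∀ c', c' ≠ c → (c :: rest).count c' = d.count c' := by
      intro c' hne
      rw [hrest]
      have ht0 : t.count c' = 0 := List.count_eq_zero.mpr (fun hx => hne (htc c' hx))
      have : ¬ c = c' := fun h => hne h.symm
      simp [List.count_append, ht0, this]
    rw [runLengths]
    constructor
    · intro hmem
      rcases List.mem_cons.mp hmem with h | h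
      · rw [← ht] at h
        exact ⟨c, by simp, by rw [hcount_c]; omega⟩
      · rcases (ih hpd).mp h with ⟨c', hc'd, hcnt⟩
        have hne : c' ≠ c := fun h => hcd (h ▸ hc'd)
        refine ⟨c', ?_, ?_⟩
        · simp [hrest, List.mem_append, hc'd]
        · rw [hcount_ne c' hne]; exact hcnt
    · rintro ⟨c', hc'mem, hcnt⟩
      by_cases hne : c' = c
      · subst hne
        rw [hcount_c] at hcnt
        exact List.mem_cons.mpr (Or.inl (by rw [← ht, hcnt]))
      · have : c' ∈ d := by
          rcases List.mem_cons.mp hc'mem with h | h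
          · exact absurd h hne
          · rw [hrest] at h
            rcases List.mem_append.mp h with h | h
            · exact absurd (htc c' h) hne
            · exact h
        rw [hcount_ne c' hne] at hcnt
        exact List.mem_cons_of_mem _ ((ih hpd).mpr ⟨c', this, hcnt⟩)

-- A-side: k is a Counter value iff some element of the list occurs exactly k times
theorem mem_counter_values {k : Int} {l : List Char} :
    k ∈ (PySem.Dict.counter l).values ↔ ∃ c ∈ l, (l.count c : Int) = k := by
  simp [PySem.Dict.values, PySem.Dict.items_counter, PySem.Set.mem_ofList]

-- per string, the two membership tests agree
theorem string_bridge (s : String) (k : Nat) :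
    ((k : Int) ∈ (PySem.Dict.counter s.toList).values) =
      (k ∈ runLengths (PySem.List.sorted s.toList (fun x => x) false)) := by
  have hperm : (PySem.List.sorted s.toList (fun x => x) false).Perm s.toList :=
    PySem.List.sorted_perm ..
  have hp : (PySem.List.sorted s.toList (fun x => x) false).Pairwise (· ≤ ·) :=
    PySem.List.sorted_pairwise ..
  rw [eq_iff_iff, mem_counter_values, mem_runLengths hp]
  constructor
  · rintro ⟨c, hc, hcnt⟩
    exact ⟨c, hperm.mem_iff.mpr hc, by rw [hperm.count_eq]; exact_mod_cast hcnt⟩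
  · rintro ⟨c, hc, hcnt⟩
    rw [hperm.count_eq] at hcnt
    exact ⟨c, hperm.mem_iff.mp hc, by exact_mod_cast hcnt⟩

-- ===== VERDICT (by name: the statement is the Claim_ definition above) =====
theorem part1_spec : Claim_equal_part1 := by
  intro puzzle_input _
  unfold Spec_part1 part1 part1_alt
  simp only [List.foldl_map]
  have hfun : (fun (acc : Int × Int) (container : String) =>
      let nd := if (2 : Int) ∈ (PySem.Dict.counter container.toList).values then acc.1 + 1 else acc.1
      let nt := if (3 : Int) ∈ (PySem.Dict.counter container.toList).values then acc.2 + 1 else acc.2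
      (nd, nt)) = (fun (acc : Int × Int) (container : String) =>
      let runs := runLengths (PySem.List.sorted container.toList (fun x => x) false)
      let nd := if 2 ∈ runs then acc.1 + 1 else acc.1
      let nt := if 3 ∈ runs then acc.2 + 1 else acc.2
      (nd, nt)) := by
    funext acc container
    have h2 := string_bridge container 2
    have h3 := string_bridge container 3
    push_cast at h2 h3
    simp only [h2, h3]
  rw [hfun]
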